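-- pv_equiv track=rewrite | github.com/CodeGodZeus/PYTHON-prOBLEMS | numbercomplement.py | findComplement
-- ===== SOURCE A (Python) =====
-- def findComplement(num: int) -> int:
--     result=0
--     pow=1
--     while(num>0):
--         result+=(num%2^1)*pow
--         pow=pow<<1
--         num>>=1
--     return result
-- ===== SOURCE B (Python) =====
-- def findComplement(num: int) -> int:
--     # Closed form: XOR with an all-ones mask of num's bit length (no loop).
--     if num <= 0:
--         return 0
--     mask = (1 << num.bit_length()) - 1
--     return num ^ mask
-- ===== Notes on version B (the rewrite author's own statement) =====
-- stated objective: simpler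
-- what changed: Replaces the per-bit accumulation loop by a single closed-form expression: XOR with the all-ones mask (1 << num.bit_length()) - 1, returning 0 for num <= 0 exactly as A's never-entered loop does.
import Mathlib
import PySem

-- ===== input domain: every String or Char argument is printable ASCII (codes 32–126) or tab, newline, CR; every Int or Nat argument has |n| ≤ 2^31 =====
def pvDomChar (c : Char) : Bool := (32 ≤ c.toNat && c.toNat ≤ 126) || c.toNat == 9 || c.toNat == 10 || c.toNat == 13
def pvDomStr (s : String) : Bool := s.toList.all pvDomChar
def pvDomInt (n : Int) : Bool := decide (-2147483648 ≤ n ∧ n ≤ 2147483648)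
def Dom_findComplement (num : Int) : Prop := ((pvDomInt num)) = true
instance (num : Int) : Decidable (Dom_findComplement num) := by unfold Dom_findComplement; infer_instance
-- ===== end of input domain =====

-- B replaces A's per-bit accumulation loop by the closed form num XOR ((1 << bit_length) - 1); same value everywhere, no speed claim.


-- ===== PORT A =====
-- A's loop; inside the loop num > 0, so Python's '%' = Int.emod, 'num >>= 1' = num / 2
-- (floor and truncation agree on nonnegatives), 'pow << 1' = pow * 2, '^' = Int xor (exact here).
def findComplement.go (num result pow : Int) : Int :=
  if num > 0 then
    findComplement.go (num / 2) (result + (Int.xor (num % 2) 1) * pow) (pow * 2)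
  else result
termination_by num.toNat
decreasing_by omega

def findComplement (num : Int) : Int := findComplement.go num 0 1

-- ===== PORT B =====
-- num.bit_length() for num > 0 is Nat.size num.toNat; '<<' and '^' on these nonnegative
-- operands are exactly Int shiftLeft / xor.
def findComplement_alt (num : Int) : Int :=
  if num ≤ 0 then 0
  else
    let mask : Int := ((1 : Int) <<< (num.toNat.size : Int)) - 1
    Int.xor num mask

-- ===== PRECONDITION & SPEC =====
def Spec_findComplement (num : Int) (out : Int) : Prop := out = findComplement_alt num
instance (num : Int) (out : Int) : Decidable (Spec_findComplement num out) := by unfold Spec_findComplement; infer_instance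

-- ===== CLAIM (what is proved, stated in full; the proofs are below) =====
def Claim_equal_findComplement : Prop := ∀ (num : Int), Dom_findComplement num → Spec_findComplement num (findComplement num)

-- ===== LEMMAS AND PROOFS =====

/-- The bitwise complement below the highest set bit, as a recursion on binary digits. -/
def pvCompl : Nat → Nat
  | 0 => 0
  | n + 1 => 2 * pvCompl ((n + 1) / 2) + (1 - (n + 1) % 2)

lemma pvCompl_pos {n : Nat} (h : n ≠ 0) : pvCompl n = 2 * pvCompl (n / 2) + (1 - n % 2) := by
  cases n with
  | zero => exact absurd rfl h
  | succ m => simp [pvCompl]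

lemma pvCompl_bit (b : Bool) (m : Nat) (h : Nat.bit b m ≠ 0) :
    pvCompl (Nat.bit b m) = Nat.bit (!b) (pvCompl m) := by
  rw [pvCompl_pos h]
  cases b
  · have h1 : Nat.bit false m / 2 = m := by simp [Nat.bit]
    have h2 : Nat.bit false m % 2 = 0 := by simp [Nat.bit]
    rw [h1, h2]
    simp [Nat.bit]
  · have h1 : Nat.bit true m / 2 = m := by simp [Nat.bit]; omega
    have h2 : Nat.bit true m % 2 = 1 := by simp [Nat.bit]
    rw [h1, h2]
    simp [Nat.bit]

lemma go_eq (num result pow : Int) :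
    findComplement.go num result pow = result + pow * (pvCompl num.toNat : Int) := by
  induction hk : num.toNat using Nat.strong_induction_on generalizing num result pow with
  | _ k ih =>
    rw [findComplement.go]
    split
    · next h =>
      have hlt : (num / 2).toNat < k := by omega
      rw [ih _ hlt _ _ _ rfl]
      have hn : num.toNat ≠ 0 := by omega
      subst hk
      rw [pvCompl_pos hn]
      have h2 : (num / 2).toNat = num.toNat / 2 := by omega
      have hm : num % 2 = (num.toNat % 2 : Nat) := by omega
      rw [h2]
      rcases Nat.mod_two_eq_zero_or_one num.toNat with h0 | h0
      · rw [hm, h0, show Int.xor ((0 : Nat) : Int) 1 = 1 by decide]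
        push_cast
        ring
      · rw [hm, h0, show Int.xor ((1 : Nat) : Int) 1 = 0 by decide]
        push_cast
        ring
    · next h =>
      have h0 : num.toNat = 0 := by omega
      rw [← hk, h0]
      simp [pvCompl]

lemma mask_xor (n : Nat) : (2 ^ n.size - 1) ^^^ n = pvCompl n := by
  induction n using Nat.binaryRec with
  | zero => simp [pvCompl]
  | bit b m ih =>
    by_cases h : Nat.bit b m = 0
    · rcases Nat.bit_eq_zero_iff.mp h with ⟨hm, hb⟩
      subst hm hb
      simp [pvCompl, Nat.bit]
    · rw [Nat.size_bit h, pvCompl_bit b m h]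
      have hmask : 2 ^ (Nat.succ m.size) - 1 = Nat.bit true (2 ^ m.size - 1) := by
        have : 1 ≤ 2 ^ m.size := Nat.one_le_two_pow
        simp [Nat.bit, Nat.pow_succ]
        omega
      rw [hmask, Nat.xor_bit, ih]
      cases b <;> rfl

lemma int_xor_natCast (a b : Nat) : Int.xor (a : Int) (b : Int) = ((a ^^^ b : Nat) : Int) := rfl

lemma int_one_shl (k : Nat) : ((1 : Int) <<< (k : Int)) = ((2 ^ k : Nat) : Int) := by
  show (Int.ofNat (Nat.shiftLeft' false 1 k)) = _
  rw [Nat.shiftLeft'_false]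
  simp [Nat.shiftLeft_eq]

-- ===== VERDICT (by name: the statement is the Claim_ definition above) =====
theorem findComplement_spec : Claim_equal_findComplement := by
  intro num _
  show findComplement num = findComplement_alt num
  rw [findComplement, go_eq]
  unfold findComplement_alt
  split
  · have : num.toNat = 0 := by omega
    simp [this, pvCompl]
  · have hpos : 0 < num := by omega
    obtain ⟨n, rfl⟩ : ∃ n : Nat, num = (n : Int) := ⟨num.toNat, by omega⟩
    simp only [Int.toNat_natCast]
    rw [int_one_shl]
    have hc : ((2 ^ n.size : Nat) : Int) - 1 = ((2 ^ n.size - 1 : Nat) : Int) := by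
      have : 1 ≤ 2 ^ n.size := Nat.one_le_two_pow
      omega
    rw [hc, int_xor_natCast, Nat.xor_comm, mask_xor]
    ring
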